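-- pv_equiv track=rewrite | github.com/rvarshini5656/Gene_Folding | gene_folding.py | goof
-- ===== SOURCE A (Python) =====
-- def checkfold(sequence):
--     mid = len(sequence) // 2
--     while mid > 0:
--         if sequence[:mid][::-1] == sequence[mid: 2 * mid]:
--             sequence = sequence[mid:]
--             mid = len(sequence) // 2
--         else:
--             mid -= 1
--     return sequence[::-1]
--
-- def goof(sequence):
--     while True:
--         initial_sequence = sequence
--         sequence = checkfold(sequence)
--         sequence = checkfold(sequence)  # CHECKING FOLDINGS AGAIN FOR REVERSE OF THE STRING
--         if sequence == initial_sequence: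
--             break
--     return len(sequence)
-- ===== SOURCE B (Python) =====
-- MODP = (1 << 61) - 1
-- BASE = 131
--
--
-- def _scan(s):
--     # Repeatedly fold at the largest half-length k whose prefix of length 2k is an
--     # even palindrome; candidates are screened with a rolling-hash comparison of
--     # the prefix of s against the matching suffix of the reversed string (exact:
--     # a hash match is confirmed by a direct comparison).  Return the reversed rest.
--     while True:
--         n = len(s)
--         r = s[::-1]
--         h = [0] * (n + 1)   # prefix hashes of s
--         g = [0] * (n + 1)   # prefix hashes of r
--         pw = [1] * (n + 1)  # powers of BASE
--         for i in range(n):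
--             h[i + 1] = (h[i] * BASE + ord(s[i])) % MODP
--             g[i + 1] = (g[i] * BASE + ord(r[i])) % MODP
--             pw[i + 1] = pw[i] * BASE % MODP
--         best = 0
--         k = n // 2
--         while k > 0:
--             # hash of s[:2k] vs hash of r[n-2k:]  (note r[n-2k:] == s[:2k][::-1])
--             if h[2 * k] == (g[n] - g[n - 2 * k] * pw[2 * k]) % MODP and s[:2 * k] == r[n - 2 * k:]:
--                 best = k
--                 break
--             k -= 1
--         if best == 0:
--             return r
--         s = s[best:]
--
--
-- def goof(sequence):
--     # Single-scan loop: stop after two consecutive scans that do not shrink the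
--     # string (then the string only flips orientation, so its length is final).
--     s = sequence
--     streak = 0
--     while streak < 2:
--         t = _scan(s)
--         streak = streak + 1 if len(t) == len(s) else 0
--         s = t
--     return len(s)
-- ===== Notes on version B (the rewrite author's own statement) =====
-- stated objective: faster
-- what changed: B finds the fold point with a rolling-hash prefilter (prefix hashes of the string and its reverse built once per scan make each even-palindromic-prefix candidate an O(1) hash test, confirmed by one direct comparison only on a match), and its outer loop applies one scan at a time, stopping after two consecutive non-shrinking scans, instead of A's double-scan whole-string-equality fixpoint.
import Mathlib
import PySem

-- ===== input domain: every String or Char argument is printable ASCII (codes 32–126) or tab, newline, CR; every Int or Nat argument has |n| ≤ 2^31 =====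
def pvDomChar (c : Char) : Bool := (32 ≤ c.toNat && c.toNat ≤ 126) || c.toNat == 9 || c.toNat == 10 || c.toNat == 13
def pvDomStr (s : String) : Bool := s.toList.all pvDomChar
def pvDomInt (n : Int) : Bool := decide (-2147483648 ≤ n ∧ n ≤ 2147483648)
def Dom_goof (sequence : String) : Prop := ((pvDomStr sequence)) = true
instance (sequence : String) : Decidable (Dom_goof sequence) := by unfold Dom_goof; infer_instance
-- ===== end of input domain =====

-- B finds fold points through a rolling-hash prefilter (confirmed by direct comparison)
-- and uses a single-scan outer loop stopping after two consecutive non-shrinking scans: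
-- same value as A, measurably faster per scan.

-- ===== PORT A =====
-- A's inner while loop of checkfold: mid counts down, a successful fold restarts at the new midpoint.
def goofCheckLoop : (s : List Char) → (mid : Nat) → List Char
  | s, 0 => s.reverse
  | s, (m+1) =>
    if (s.take (m+1)).reverse = (s.drop (m+1)).take (m+1) then
      goofCheckLoop (s.drop (m+1)) ((s.drop (m+1)).length / 2)
    else
      goofCheckLoop s m
termination_by s mid => (s.length, mid)
decreasing_by
  · rcases Nat.eq_zero_or_pos s.length with h | h
    · have hz : (s.drop (m+1)).length = s.length := by simp [h]
      rw [hz]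
      exact Prod.Lex.right _ (by omega)
    · exact Prod.Lex.left _ _ (by simp; omega)
  · exact Prod.Lex.right _ (by omega)

def goofCheck (s : List Char) : List Char := goofCheckLoop s (s.length / 2)

-- A's outer while True loop; fuel (length + 1) only makes it total, each non-break step shortens.
def goofLoopA : Nat → List Char → Int
  | 0, s => (s.length : Int)
  | (f+1), s =>
    let t := goofCheck (goofCheck s)
    if t = s then (t.length : Int) else goofLoopA f t

def goof (sequence : String) : Int :=
  goofLoopA (sequence.toList.length + 1) sequence.toList

-- ===== PORT B =====
-- Source B's rolling hash: MODP = 2^61 - 1, BASE = 131.  Python's prefix-hash arrays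
-- h, g, pw are ported as the prefix functions goofHash (take m) and goofPow m —
-- element m of each array is exactly that value.
def goofHfrom (x : Int) (l : List Char) : Int :=
  l.foldl (fun a c => PySem.Int.mod (a * 131 + (c.toNat : Int)) 2305843009213693951) x

def goofHash (l : List Char) : Int := goofHfrom 0 l

def goofPow : Nat → Int
  | 0 => 1
  | (k+1) => PySem.Int.mod (goofPow k * 131) 2305843009213693951

-- Source B's inner `while k > 0` candidate loop with break: downward search for the first
-- (= largest) k whose hash test fires and whose strings really match.
def goofFindK (s r : List Char) (n : Nat) : Nat → Nat
  | 0 => 0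
  | (k+1) =>
    if goofHash (s.take (2*(k+1))) =
         PySem.Int.mod (goofHash r - goofHash (r.take (n - 2*(k+1))) * goofPow (2*(k+1)))
           2305843009213693951
       ∧ s.take (2*(k+1)) = r.drop (n - 2*(k+1)) then
      k+1
    else
      goofFindK s r n k

-- needed by goofScan's termination: goofFindK returns 0 or a value in [1, m]
theorem goofFindK_pos (s r : List Char) (n : Nat) :
    ∀ m, goofFindK s r n m ≠ 0 → 1 ≤ goofFindK s r n m ∧ goofFindK s r n m ≤ m := by
  intro m
  induction m with
  | zero => intro h; exact absurd rfl h
  | succ k ih =>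
    intro h
    rw [goofFindK] at h ⊢
    split
    · omega
    · rename_i hc
      rw [if_neg hc] at h
      have := ih h
      omega

-- Source B's _scan while-loop: fold at the found k, else return the reversed string.
def goofScan (s : List Char) : List Char :=
  if h : goofFindK s s.reverse s.length (s.length / 2) = 0 then s.reverse
  else goofScan (s.drop (goofFindK s s.reverse s.length (s.length / 2)))
termination_by s.length
decreasing_by
  have hb := goofFindK_pos s s.reverse s.length (s.length / 2) h
  simp
  omega

-- Source B's outer loop: streak counts consecutive non-shrinking scans; fuel only makes it total.
def goofLoopB : Nat → Nat → List Char → Int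
  | 0, _, s => (s.length : Int)
  | (f+1), streak, s =>
    if streak < 2 then
      goofLoopB f (if (goofScan s).length = s.length then streak + 1 else 0) (goofScan s)
    else
      (s.length : Int)

def goof_alt (sequence : String) : Int :=
  goofLoopB (2 * sequence.toList.length + 3) 0 sequence.toList

-- ===== PRECONDITION & SPEC =====
def Spec_goof (sequence : String) (out : Int) : Prop := out = goof_alt sequence
instance (sequence : String) (out : Int) : Decidable (Spec_goof sequence out) := by unfold Spec_goof; infer_instance

-- ===== CLAIM (what is proved, stated in full; the proofs are below) =====
def Claim_equal_goof : Prop := ∀ (sequence : String), Dom_goof sequence → Spec_goof sequence (goof sequence)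

-- ===== LEMMAS AND PROOFS =====

-- downward first-hit search for a predicate: the common shape of A's decrement phase
-- and of B's candidate loop
def goofChooseGen (p : Nat → Prop) [DecidablePred p] : Nat → Nat
  | 0 => 0
  | (m+1) => if p (m+1) then m+1 else goofChooseGen p m

theorem goofChooseGen_pos (p : Nat → Prop) [DecidablePred p] :
    ∀ m, goofChooseGen p m ≠ 0 → 1 ≤ goofChooseGen p m ∧ goofChooseGen p m ≤ m := by
  intro m
  induction m with
  | zero => intro h; exact absurd rfl h
  | succ k ih =>
    intro h
    rw [goofChooseGen] at h ⊢
    split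
    · omega
    · rename_i hc
      rw [if_neg hc] at h
      have := ih h
      omega

-- A's checkfold loop, expressed through the downward search
theorem goofCheckLoop_eq (s : List Char) :
    ∀ (mid : Nat),
      goofCheckLoop s mid =
      (if goofChooseGen (fun k => (s.take k).reverse = (s.drop k).take k) mid = 0
       then s.reverse
       else goofCheck (s.drop (goofChooseGen (fun k => (s.take k).reverse = (s.drop k).take k) mid))) := by
  intro mid
  induction mid with
  | zero => simp [goofCheckLoop, goofChooseGen]
  | succ m ih =>
    by_cases hp : (s.take (m+1)).reverse = (s.drop (m+1)).take (m+1)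
    · rw [goofCheckLoop, if_pos hp]
      simp only [goofChooseGen, if_pos hp]
      have : ¬ (m+1 = 0) := by omega
      rw [if_neg this]
      rfl
    · rw [goofCheckLoop, if_neg hp]
      simp only [goofChooseGen, if_neg hp]
      exact ih

-- ---- rolling-hash correctness ----

theorem goofHfrom_bounds (l : List Char) :
    ∀ x : Int, 0 ≤ x → x < 2305843009213693951 →
      0 ≤ goofHfrom x l ∧ goofHfrom x l < 2305843009213693951 := by
  induction l with
  | nil => intro x h0 h1; exact ⟨h0, h1⟩
  | cons c t ih =>
    intro x h0 h1
    simp only [goofHfrom, List.foldl_cons]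
    exact ih _ (PySem.Int.mod_nonneg _ (by norm_num)) (PySem.Int.mod_lt _ (by norm_num))

theorem goofHash_bounds (l : List Char) :
    0 ≤ goofHash l ∧ goofHash l < 2305843009213693951 :=
  goofHfrom_bounds l 0 le_rfl (by norm_num)

theorem goofHfrom_congr (l : List Char) :
    ∀ x y : Int, Int.ModEq 2305843009213693951 x y →
      Int.ModEq 2305843009213693951 (goofHfrom x l) (goofHfrom y l) := by
  induction l with
  | nil => intro x y h; exact h
  | cons c t ih =>
    intro x y h
    simp only [goofHfrom, List.foldl_cons] at *
    have hstep : PySem.Int.mod (x * 131 + (c.toNat : Int)) 2305843009213693951 =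
        PySem.Int.mod (y * 131 + (c.toNat : Int)) 2305843009213693951 := by
      rw [PySem.Int.mod_eq_emod_of_pos (by norm_num),
          PySem.Int.mod_eq_emod_of_pos (by norm_num)]
      exact (h.mul_right 131).add_right _
    rw [hstep]

theorem goofHfrom_formula (l : List Char) :
    ∀ x : Int, Int.ModEq 2305843009213693951 (goofHfrom x l)
      (x * 131 ^ l.length + goofHfrom 0 l) := by
  induction l with
  | nil =>
    intro x
    simp [goofHfrom]
  | cons c t ih =>
    intro x
    have hM : (0:Int) < 2305843009213693951 := by norm_num
    have hstep : ∀ z : Int,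
        Int.ModEq 2305843009213693951
          (goofHfrom (PySem.Int.mod (z * 131 + (c.toNat : Int)) 2305843009213693951) t)
          ((z * 131 + (c.toNat : Int)) * 131 ^ t.length + goofHfrom 0 t) := by
      intro z
      have h1 : Int.ModEq 2305843009213693951
          (PySem.Int.mod (z * 131 + (c.toNat : Int)) 2305843009213693951)
          (z * 131 + (c.toNat : Int)) := by
        rw [PySem.Int.mod_eq_emod_of_pos hM]
        exact Int.emod_emod_of_dvd _ dvd_rfl
      exact (goofHfrom_congr t _ _ h1).trans (ih _)
    have lhs : Int.ModEq 2305843009213693951 (goofHfrom x (c :: t))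
        ((x * 131 + (c.toNat : Int)) * 131 ^ t.length + goofHfrom 0 t) := by
      simpa [goofHfrom, List.foldl_cons] using hstep x
    have rhs : Int.ModEq 2305843009213693951
        (x * 131 ^ (t.length + 1) + goofHfrom 0 (c :: t))
        (x * 131 ^ (t.length + 1) + ((0 * 131 + (c.toNat : Int)) * 131 ^ t.length + goofHfrom 0 t)) := by
      have := hstep 0
      simpa [goofHfrom, List.foldl_cons] using Int.ModEq.add_left (x * 131 ^ (t.length + 1)) this
    have hring : x * 131 ^ (t.length + 1) + ((0 * 131 + (c.toNat : Int)) * 131 ^ t.length + goofHfrom 0 t)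
        = (x * 131 + (c.toNat : Int)) * 131 ^ t.length + goofHfrom 0 t := by ring
    rw [hring] at rhs
    simpa [List.length_cons] using lhs.trans rhs.symm

theorem goofPow_modeq : ∀ k : Nat, Int.ModEq 2305843009213693951 (goofPow k) (131 ^ k) := by
  intro k
  induction k with
  | zero => rfl
  | succ m ih =>
    have hM : (0:Int) < 2305843009213693951 := by norm_num
    have h1 : Int.ModEq 2305843009213693951 (goofPow (m+1)) (goofPow m * 131) := by
      rw [goofPow, PySem.Int.mod_eq_emod_of_pos hM]
      exact Int.emod_emod_of_dvd _ dvd_rfl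
    calc goofPow (m+1) ≡ goofPow m * 131 [ZMOD 2305843009213693951] := h1
      _ ≡ 131 ^ m * 131 [ZMOD 2305843009213693951] := ih.mul_right 131
      _ = 131 ^ (m+1) := by ring

-- the subtraction formula Source B uses for the hash of a suffix of r
theorem goofHash_sub (r : List Char) (m : Nat) (_hm : m ≤ r.length) :
    PySem.Int.mod (goofHash r - goofHash (r.take m) * goofPow (r.length - m)) 2305843009213693951
      = goofHash (r.drop m) := by
  have hsplit : goofHash r = goofHfrom (goofHash (r.take m)) (r.drop m) := by
    conv_lhs => rw [goofHash, ← List.take_append_drop m r]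
    rw [goofHfrom, List.foldl_append]
    rfl
  have hlen : (r.drop m).length = r.length - m := by simp
  have h1 : Int.ModEq 2305843009213693951 (goofHash r)
      (goofHash (r.take m) * 131 ^ (r.length - m) + goofHash (r.drop m)) := by
    rw [hsplit]
    simpa [hlen] using goofHfrom_formula (r.drop m) (goofHash (r.take m))
  have h2 : Int.ModEq 2305843009213693951
      (goofHash (r.take m) * goofPow (r.length - m))
      (goofHash (r.take m) * 131 ^ (r.length - m)) :=
    (goofPow_modeq (r.length - m)).mul_left _
  have h3 : Int.ModEq 2305843009213693951
      (goofHash r - goofHash (r.take m) * goofPow (r.length - m))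
      (goofHash (r.drop m)) := by
    have := h1.sub h2
    simpa using this
  have hb := goofHash_bounds (r.drop m)
  rw [PySem.Int.mod_eq_emod_of_pos (by norm_num)]
  calc (goofHash r - goofHash (r.take m) * goofPow (r.length - m)) % 2305843009213693951
      = goofHash (r.drop m) % 2305843009213693951 := h3
    _ = goofHash (r.drop m) := Int.emod_eq_of_lt hb.1 hb.2

-- ---- the even-palindromic-prefix tests agree ----

theorem goofPalHalves (s : List Char) (k : Nat) (h2k : 2*k ≤ s.length) :
    (s.take (2*k) = s.reverse.drop (s.length - 2*k)) ↔
    ((s.take k).reverse = (s.drop k).take k) := by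
  have hrev : s.reverse.drop (s.length - 2*k) = (s.take (2*k)).reverse := by
    rw [List.drop_reverse]
    have h : s.length - (s.length - 2*k) = 2*k := by omega
    rw [h]
  have hsplit : s.take (2*k) = s.take k ++ (s.drop k).take k := by
    rw [show 2*k = k + k by ring, List.take_add]
  have hu : (s.take k).length = k := by rw [List.length_take]; omega
  have hv : ((s.drop k).take k).length = k := by rw [List.length_take, List.length_drop]; omega
  rw [hrev, hsplit]
  constructor
  · intro h
    rw [List.reverse_append] at h
    exact (List.append_inj h (by rw [List.length_reverse, hu, hv])).2.symm
  · intro h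
    rw [List.reverse_append, ← h, List.reverse_reverse]

theorem goofTest_iff (s : List Char) (k : Nat) (h2k : 2*k ≤ s.length) :
    (goofHash (s.take (2*k)) =
       PySem.Int.mod (goofHash s.reverse - goofHash (s.reverse.take (s.length - 2*k)) * goofPow (2*k))
         2305843009213693951
     ∧ s.take (2*k) = s.reverse.drop (s.length - 2*k)) ↔
    ((s.take k).reverse = (s.drop k).take k) := by
  have hm : s.length - 2*k ≤ s.reverse.length := by simp
  have hpw : s.reverse.length - (s.length - 2*k) = 2*k := by simp; omega
  have hsub := goofHash_sub s.reverse (s.length - 2*k) hm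
  rw [hpw] at hsub
  constructor
  · intro h
    exact (goofPalHalves s k h2k).1 h.2
  · intro h
    have hstr := (goofPalHalves s k h2k).2 h
    exact ⟨by rw [hsub, hstr], hstr⟩

theorem goofFindK_eq (s : List Char) :
    ∀ m, m ≤ s.length / 2 →
      goofFindK s s.reverse s.length m =
      goofChooseGen (fun k => (s.take k).reverse = (s.drop k).take k) m := by
  intro m
  induction m with
  | zero => intro _; rfl
  | succ k ih =>
    intro hm
    have h2k : 2*(k+1) ≤ s.length := by omega
    rw [goofFindK, goofChooseGen]
    rw [if_congr (goofTest_iff s (k+1) h2k) rfl (ih (by omega))]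

-- B's scan computes exactly A's checkfold
theorem goofScan_eq_check : ∀ (s : List Char), goofScan s = goofCheck s := by
  have H : ∀ (n : Nat) (s : List Char), s.length ≤ n → goofScan s = goofCheck s := by
    intro n
    induction n with
    | zero =>
      intro s hs
      have hnil : s = [] := List.eq_nil_of_length_eq_zero (by omega)
      subst hnil
      rw [goofScan.eq_def]
      simp [goofCheck, goofCheckLoop, goofFindK]
    | succ m ih =>
      intro s hs
      rw [goofScan.eq_def, goofCheck, goofCheckLoop_eq s (s.length / 2)]
      simp only [goofFindK_eq s (s.length / 2) le_rfl]
      by_cases h0 : goofChooseGen (fun k => (s.take k).reverse = (s.drop k).take k) (s.length / 2) = 0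
      · rw [dif_pos h0, if_pos h0]
      · rw [dif_neg h0, if_neg h0]
        have hb := goofChooseGen_pos _ (s.length / 2) h0
        exact ih _ (by simp; omega)
  intro s
  exact H s.length s le_rfl

-- ---- properties of the scan needed for the outer loops ----

theorem goofCheck_length_le (s : List Char) :
    (goofCheck s).length ≤ s.length := by
  rw [← goofScan_eq_check]
  have H : ∀ (n : Nat) (s : List Char), s.length ≤ n → (goofScan s).length ≤ s.length := by
    intro n
    induction n with
    | zero =>
      intro s hs
      have hnil : s = [] := List.eq_nil_of_length_eq_zero (by omega)
      subst hnil
      rw [goofScan.eq_def]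
      simp [goofFindK]
    | succ m ih =>
      intro s hs
      rw [goofScan.eq_def]
      by_cases h0 : goofFindK s s.reverse s.length (s.length / 2) = 0
      · rw [dif_pos h0]; simp
      · rw [dif_neg h0]
        have hb := goofFindK_pos s s.reverse s.length (s.length / 2) h0
        have := ih (s.drop (goofFindK s s.reverse s.length (s.length / 2))) (by simp; omega)
        simp only [List.length_drop] at this ⊢
        omega
  exact H s.length s le_rfl

theorem goofCheck_len_eq (s : List Char) (h : (goofCheck s).length = s.length) :
    goofCheck s = s.reverse := by
  rw [← goofScan_eq_check] at h ⊢
  rw [goofScan.eq_def] at h ⊢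
  by_cases h0 : goofFindK s s.reverse s.length (s.length / 2) = 0
  · rw [dif_pos h0]
  · exfalso
    rw [dif_neg h0] at h
    have hb := goofFindK_pos s s.reverse s.length (s.length / 2) h0
    have hle : (goofScan (s.drop (goofFindK s s.reverse s.length (s.length / 2)))).length
        ≤ (s.drop (goofFindK s s.reverse s.length (s.length / 2))).length := by
      rw [goofScan_eq_check]; exact goofCheck_length_le _
    simp only [List.length_drop] at h hle
    omega

-- if A's double scan is not a fixpoint, it strictly shortens
theorem goofDouble_lt (s : List Char) (h : goofCheck (goofCheck s) ≠ s) :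
    (goofCheck (goofCheck s)).length < s.length := by
  by_cases h1 : (goofCheck s).length = s.length
  · by_cases h2 : (goofCheck (goofCheck s)).length = (goofCheck s).length
    · exfalso
      apply h
      rw [goofCheck_len_eq _ h2, goofCheck_len_eq _ h1, List.reverse_reverse]
    · have := goofCheck_length_le (goofCheck s)
      omega
  · have ha := goofCheck_length_le s
    have hb := goofCheck_length_le (goofCheck s)
    omega

-- A's loop ignores extra fuel
theorem goofLoopA_fuel : ∀ (n : Nat) (s : List Char), s.length ≤ n →
    ∀ f g, s.length < f → s.length < g → goofLoopA f s = goofLoopA g s := by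
  intro n
  induction n with
  | zero =>
    intro s hs f g hf hg
    obtain ⟨f', rfl⟩ : ∃ f', f = f' + 1 := ⟨f - 1, by omega⟩
    obtain ⟨g', rfl⟩ : ∃ g', g = g' + 1 := ⟨g - 1, by omega⟩
    have hnil : s = [] := List.eq_nil_of_length_eq_zero (by omega)
    subst hnil
    rw [goofLoopA, goofLoopA]
    have : goofCheck (goofCheck []) = ([] : List Char) := by
      have := goofCheck_length_le (goofCheck [])
      have := goofCheck_length_le ([] : List Char)
      exact List.eq_nil_of_length_eq_zero (by omega)
    simp [this]
  | succ m ih =>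
    intro s hs f g hf hg
    obtain ⟨f', rfl⟩ : ∃ f', f = f' + 1 := ⟨f - 1, by omega⟩
    obtain ⟨g', rfl⟩ : ∃ g', g = g' + 1 := ⟨g - 1, by omega⟩
    rw [goofLoopA, goofLoopA]
    by_cases he : goofCheck (goofCheck s) = s
    · rw [if_pos he, if_pos he]
    · rw [if_neg he, if_neg he]
      have hl := goofDouble_lt s he
      exact ih _ (by omega) f' g' (by omega) (by omega)

-- A's result as a function of the start string alone (proof-only helper)
def goofE (s : List Char) : Int := goofLoopA (s.length + 1) s

theorem goofE_unfold (s : List Char) :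
    goofE s = if goofCheck (goofCheck s) = s then (s.length : Int)
              else goofE (goofCheck (goofCheck s)) := by
  rw [goofE, goofLoopA]
  by_cases he : goofCheck (goofCheck s) = s
  · rw [if_pos he, if_pos he, he]
  · rw [if_neg he, if_neg he, goofE]
    have hl := goofDouble_lt s he
    exact goofLoopA_fuel s.length _ (by omega) _ _ (by omega) (by omega)

-- the eventual length is invariant under one extra scan (phase alignment)
theorem goofE_scan : ∀ (n : Nat) (v : List Char), v.length ≤ n →
    goofE v = goofE (goofCheck v) := by
  intro n
  induction n with
  | zero =>
    intro v hv
    have hnil : v = [] := List.eq_nil_of_length_eq_zero (by omega)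
    subst hnil
    have : goofCheck ([] : List Char) = [] :=
      List.eq_nil_of_length_eq_zero (by have := goofCheck_length_le ([] : List Char); omega)
    rw [this]
  | succ m ih =>
    intro v hv
    by_cases hlen : (goofCheck v).length = v.length
    · have hw : goofCheck v = v.reverse := goofCheck_len_eq v hlen
      by_cases h2 : (goofCheck (goofCheck v)).length = (goofCheck v).length
      · have hvv : goofCheck (goofCheck v) = v := by
          rw [goofCheck_len_eq _ h2, hw, List.reverse_reverse]
        rw [goofE_unfold v, if_pos hvv, goofE_unfold (goofCheck v)]
        have hc : goofCheck (goofCheck (goofCheck v)) = goofCheck v := by rw [hvv]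
        rw [if_pos hc, hlen]
      · have hcc : goofCheck (goofCheck v) ≠ v := by
          intro h
          rw [h] at h2
          exact h2 hlen.symm
        have hlt : (goofCheck (goofCheck v)).length < v.length := by
          have := goofCheck_length_le (goofCheck v)
          omega
        rw [goofE_unfold v, if_neg hcc, goofE_unfold (goofCheck v)]
        have hne : goofCheck (goofCheck (goofCheck v)) ≠ goofCheck v := by
          intro h
          have h1 := goofCheck_length_le (goofCheck (goofCheck v))
          have : (goofCheck (goofCheck (goofCheck v))).length = (goofCheck v).length := by rw [h]
          omega
        rw [if_neg hne]
        exact ih (goofCheck (goofCheck v)) (by omega)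
    · have hlt : (goofCheck v).length < v.length := by
        have := goofCheck_length_le v
        omega
      have hcc : goofCheck (goofCheck v) ≠ v := by
        intro h
        have h1 := goofCheck_length_le (goofCheck v)
        have : (goofCheck (goofCheck v)).length = v.length := by rw [h]
        omega
      rw [goofE_unfold v, if_neg hcc]
      exact (ih (goofCheck v) (by omega)).symm

-- B's streak loop at streak 2 returns immediately
theorem goofLoopB_streak2 : ∀ f streak s, 2 ≤ streak → goofLoopB f streak s = (s.length : Int) := by
  intro f streak s h
  cases f with
  | zero => rfl
  | succ f' => rw [goofLoopB, if_neg (by omega)]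

-- B's streak loop computes A's eventual length
theorem goofLoopB_eq : ∀ (n : Nat) (s : List Char), s.length ≤ n →
    ∀ f, 2 * s.length + 3 ≤ f → goofLoopB f 0 s = goofE s := by
  intro n
  induction n with
  | zero =>
    intro s hs f hf
    have hnil : s = [] := List.eq_nil_of_length_eq_zero (by omega)
    subst hnil
    obtain ⟨f1, rfl⟩ : ∃ f1, f = f1 + 1 := ⟨f - 1, by omega⟩
    have hc : goofScan ([] : List Char) = [] := by
      rw [goofScan_eq_check]
      exact List.eq_nil_of_length_eq_zero (by have := goofCheck_length_le ([] : List Char); omega)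
    rw [goofLoopB, if_pos (by omega), hc]
    rw [if_pos rfl]
    obtain ⟨f2, rfl⟩ : ∃ f2, f1 = f2 + 1 := ⟨f1 - 1, by omega⟩
    rw [goofLoopB, if_pos (by omega), hc]
    rw [if_pos rfl]
    rw [goofLoopB_streak2 _ _ _ (by omega)]
    have hE : goofCheck (goofCheck ([] : List Char)) = [] := by
      refine List.eq_nil_of_length_eq_zero ?_
      have h1 := goofCheck_length_le ([] : List Char)
      have h2 := goofCheck_length_le (goofCheck ([] : List Char))
      omega
    rw [goofE_unfold, if_pos hE]
  | succ m ih =>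
    intro s hs f hf
    obtain ⟨f1, rfl⟩ : ∃ f1, f = f1 + 1 := ⟨f - 1, by omega⟩
    rw [goofLoopB, if_pos (by omega)]
    simp only [goofScan_eq_check]
    by_cases h1 : (goofCheck s).length = s.length
    · rw [if_pos h1]
      have hw : goofCheck s = s.reverse := goofCheck_len_eq s h1
      obtain ⟨f2, rfl⟩ : ∃ f2, f1 = f2 + 1 := ⟨f1 - 1, by omega⟩
      rw [goofLoopB, if_pos (by omega)]
      simp only [goofScan_eq_check]
      by_cases h2 : (goofCheck (goofCheck s)).length = (goofCheck s).length
      · rw [if_pos h2]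
        have hvv : goofCheck (goofCheck s) = s := by
          rw [goofCheck_len_eq _ h2, hw, List.reverse_reverse]
        rw [hvv, goofLoopB_streak2 _ _ _ (by omega), goofE_unfold, if_pos hvv]
      · rw [if_neg h2]
        have hlt : (goofCheck (goofCheck s)).length < s.length := by
          have := goofCheck_length_le (goofCheck s)
          omega
        have hcc : goofCheck (goofCheck s) ≠ s := by
          intro h
          have : (goofCheck (goofCheck s)).length = s.length := by rw [h]
          omega
        rw [ih (goofCheck (goofCheck s)) (by omega) f2 (by omega)]
        rw [goofE_unfold s, if_neg hcc]
    · rw [if_neg h1]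
      have hlt : (goofCheck s).length < s.length := goofCheck_length_le s |>.lt_of_ne h1
      rw [ih (goofCheck s) (by omega) f1 (by omega)]
      have hcc : goofCheck (goofCheck s) ≠ s := by
        intro h
        have h2 := goofCheck_length_le (goofCheck s)
        have : (goofCheck (goofCheck s)).length = s.length := by rw [h]
        omega
      rw [goofE_unfold s, if_neg hcc]
      exact goofE_scan (goofCheck s).length (goofCheck s) le_rfl

-- ===== VERDICT (by name: the statement is the Claim_ definition above) =====
theorem goof_spec : Claim_equal_goof := by
  intro sequence _
  unfold Spec_goof goof goof_alt
  rw [goofLoopB_eq sequence.toList.length sequence.toList le_rfl _ le_rfl]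
  rfl
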